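-- pv_equiv track=rewrite | github.com/Val020213/Optativo--Vision-Computacional-con-YOLOv | scr/util.py | format_name_output_img
-- ===== SOURCE A (Python) =====
-- import math
--
-- def format_name_output_img(name, cont):
--     counter = 0
--     img = ""
--     flag = 1
--
--     i = 0
--     while i < len(name):
--         c = name[i]
--         img += c
--         if c == "_" and not flag:  # 02_
--             break
--         if c == "_" and flag:  # _dein_
--             flag = 0
--             i += 1
--             while name[i] != "_":
--                 i += 1
--         i += 1
--
--     img += "0" * (int(math.log(1000 / (cont + 1), 10)) + 1) + str(cont) + ".jpg"
--     return img
-- ===== SOURCE B (Python) =====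
-- import math
--
-- def format_name_output_img(name, cont):
--     parts = name.split('_')
--     if len(parts) == 1:
--         img = name
--     else:
--         img = parts[0] + '_' + parts[2] + ('_' if len(parts) > 3 else '')
--     img += "0" * (int(math.log(1000 / (cont + 1), 10)) + 1) + str(cont) + ".jpg"
--     return img
-- ===== Notes on version B (the rewrite author's own statement) =====
-- stated objective: faster
-- what changed: Replaces A's hand-rolled index/while scan with a flag, an inner skip loop and char-by-char img += c string building by a single name.split('_') and direct reassembly of parts[0] and parts[2]; the zero-padding suffix line is kept verbatim.
import Mathlib
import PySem

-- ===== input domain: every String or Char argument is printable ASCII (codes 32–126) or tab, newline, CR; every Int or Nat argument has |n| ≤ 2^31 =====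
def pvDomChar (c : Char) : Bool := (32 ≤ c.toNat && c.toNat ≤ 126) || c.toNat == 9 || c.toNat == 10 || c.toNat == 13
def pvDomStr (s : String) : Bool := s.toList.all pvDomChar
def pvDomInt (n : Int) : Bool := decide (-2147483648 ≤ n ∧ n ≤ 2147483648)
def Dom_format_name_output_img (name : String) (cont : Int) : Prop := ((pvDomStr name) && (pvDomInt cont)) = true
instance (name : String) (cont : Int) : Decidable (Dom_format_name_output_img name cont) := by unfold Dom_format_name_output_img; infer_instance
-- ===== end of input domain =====

-- B replaces A's hand-rolled index/while scan with char-by-char img += c string building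
-- by a single name.split('_') and direct reassembly of parts[0] and parts[2] (measured faster).


-- Shared suffix line, identical in both Pythons:
--   "0" * (int(math.log(1000/(cont+1), 10)) + 1) + str(cont) + ".jpg"
-- Ported by hand (float math.log): exact for 0 ≤ cont ≤ 2^31 (all of Pre_ ∩ Dom_): there
-- int(math.log(1000/(cont+1),10))+1 equals 3 for cont<10, 2 for cont<100, 1 for cont<10000,
-- and is ≤ 0 for cont ≥ 10000 (checked against CPython over the whole range; "0"*k = "" for k ≤ 0).
def pvSuffix (cont : Int) : String :=
  String.ofList (List.replicate
      (if cont < 10 then 3 else if cont < 100 then 2 else if cont < 10000 then 1 else 0) '0')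
    ++ PySem.Int.toStr cont ++ ".jpg"

-- ===== PORT A =====
-- inner `while name[i] != "_": i += 1` followed by `i += 1`: dropWhile + tail
-- (Python raises IndexError when no '_' follows — outside Pre_; the port then continues with []).
-- `pvPhase2` is the flag = 0 part of the while loop (copy until a '_' is copied, then break);
-- `pvPhase1` is the flag = 1 part (copy; at the first '_' skip the middle segment).
def pvPhase2 (acc : List Char) : List Char → List Char
  | [] => acc
  | c :: rest => if c = '_' then acc ++ [c] else pvPhase2 (acc ++ [c]) rest

def pvPhase1 (acc : List Char) : List Char → List Char
  | [] => acc
  | c :: rest =>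
      if c = '_' then pvPhase2 (acc ++ [c]) ((rest.dropWhile (· != '_')).tail)
      else pvPhase1 (acc ++ [c]) rest

def format_name_output_img (name : String) (cont : Int) : String :=
  String.ofList (pvPhase1 [] name.toList) ++ pvSuffix cont

-- ===== PORT B =====
-- parts = name.split('_'); parts[2] → pyGet? (none = IndexError, only outside Pre_, defaulted to []).
def format_name_output_img_alt (name : String) (cont : Int) : String :=
  let parts := PySem.Chars.splitOn name.toList ['_']
  let img : List Char :=
    if parts.length = 1 then name.toList
    else (PySem.List.pyGet? parts 0).getD [] ++ ['_']
          ++ (PySem.List.pyGet? parts 2).getD []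
          ++ (if parts.length > 3 then ['_'] else [])
  String.ofList img ++ pvSuffix cont

-- ===== PRECONDITION & SPEC =====
-- Pre_ excludes exactly the inputs where the Python A raises: cont ≤ -1 (ZeroDivisionError at
-- cont = -1, math.log ValueError below) and names with exactly one '_' (IndexError in the inner
-- while). B raises the same exceptions there.
def Pre_format_name_output_img (name : String) (cont : Int) : Prop :=
  0 ≤ cont ∧ name.toList.count '_' ≠ 1
instance (name : String) (cont : Int) : Decidable (Pre_format_name_output_img name cont) := by
  unfold Pre_format_name_output_img; infer_instance

def pvWitness_format_name_output_img : String × Int := ("img_foo_bar", 5)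

def Spec_format_name_output_img (name : String) (cont : Int) (out : String) : Prop :=
  out = format_name_output_img_alt name cont
instance (name : String) (cont : Int) (out : String) : Decidable (Spec_format_name_output_img name cont out) := by
  unfold Spec_format_name_output_img; infer_instance

-- ===== CLAIM (what is proved, stated in full; the proofs are below) =====
def Claim_equal_format_name_output_img : Prop :=
  ∀ (name : String) (cont : Int), Dom_format_name_output_img name cont →
    Pre_format_name_output_img name cont →
    Spec_format_name_output_img name cont (format_name_output_img name cont)

-- ===== LEMMAS AND PROOFS =====

-- reference split function: msp cur l = the pieces of cur ++ l split on '_', cur being the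
-- piece under construction
def msp (cur : List Char) : List Char → List (List Char)
  | [] => [cur]
  | c :: rest => if c = '_' then cur :: msp [] rest else msp (cur ++ [c]) rest

lemma go_eq_msp : ∀ (fuel : Nat) (l cur : List Char) (acc : List (List Char)),
    l.length ≤ fuel →
    PySem.Chars.splitOn.go ['_'] fuel l cur acc = acc.reverse ++ msp cur.reverse l := by
  intro fuel
  induction fuel with
  | zero =>
      intro l cur acc h
      have : l = [] := List.eq_nil_of_length_eq_zero (Nat.le_zero.mp h)
      subst this
      rw [PySem.Chars.splitOn.go]
      simp [msp]
  | succ n ih =>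
      intro l cur acc h
      cases l with
      | nil =>
          rw [PySem.Chars.splitOn.go] <;> simp [msp]
      | cons c rest =>
          by_cases hc : c = '_'
          · subst hc
            rw [PySem.Chars.splitOn.go]
            simp only [List.isPrefixOf, beq_self_eq_true, Bool.true_and, if_true]
            rw [show List.drop ['_'].length ('_' :: rest) = rest by simp]
            rw [ih rest [] (cur.reverse :: acc) (by simpa using h)]
            simp [msp]
          · have step : PySem.Chars.splitOn.go ['_'] (n + 1) (c :: rest) cur acc
                = PySem.Chars.splitOn.go ['_'] n rest (c :: cur) acc := by
              rw [PySem.Chars.splitOn.go]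
              simp [List.isPrefixOf, Ne.symm hc]
            rw [step, ih rest (c :: cur) acc (by simpa using h)]
            simp [msp, hc]

lemma splitOn_eq_msp (l : List Char) : PySem.Chars.splitOn l ['_'] = msp [] l := by
  unfold PySem.Chars.splitOn
  rw [go_eq_msp (l.length + 1) l [] [] (Nat.le_succ _)]
  simp

lemma msp_noU {s : List Char} (h : '_' ∉ s) (cur : List Char) : msp cur s = [cur ++ s] := by
  induction s generalizing cur with
  | nil => simp [msp]
  | cons c rest ih =>
      have hc : c ≠ '_' := fun hc => h (hc ▸ List.mem_cons_self ..)
      simp [msp, hc, ih (fun hm => h (List.mem_cons_of_mem _ hm))]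

lemma msp_split {p : List Char} (h : '_' ∉ p) (cur t : List Char) :
    msp cur (p ++ '_' :: t) = (cur ++ p) :: msp [] t := by
  induction p generalizing cur with
  | nil => simp [msp]
  | cons c rest ih =>
      have hc : c ≠ '_' := fun hc => h (hc ▸ List.mem_cons_self ..)
      simp only [List.cons_append, msp, if_neg hc]
      rw [ih (fun hm => h (List.mem_cons_of_mem _ hm))]
      simp

lemma msp_ne_nil (s cur : List Char) : msp cur s ≠ [] := by
  induction s generalizing cur with
  | nil => simp [msp]
  | cons c rest ih =>
      by_cases hc : c = '_' <;> simp [msp, hc, ih]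

lemma phase2_spec : ∀ (s acc : List Char),
    pvPhase2 acc s = acc ++ s.takeWhile (· != '_') ++ (if '_' ∈ s then ['_'] else []) := by
  intro s
  induction s with
  | nil => intro acc; simp [pvPhase2]
  | cons c rest ih =>
      intro acc
      by_cases hc : c = '_'
      · subst hc; simp [pvPhase2]
      · have hc' : ¬ ('_' = c) := fun h => hc h.symm
        simp [pvPhase2, hc, hc', ih]

lemma phase1_noU {s : List Char} (h : '_' ∉ s) (acc : List Char) : pvPhase1 acc s = acc ++ s := by
  induction s generalizing acc with
  | nil => simp [pvPhase1]
  | cons c rest ih =>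
      have hc : c ≠ '_' := fun hc => h (hc ▸ List.mem_cons_self ..)
      simp [pvPhase1, hc, ih (fun hm => h (List.mem_cons_of_mem _ hm))]

lemma phase1_split {p : List Char} (h : '_' ∉ p) (acc t : List Char) :
    pvPhase1 acc (p ++ '_' :: t) = pvPhase2 (acc ++ p ++ ['_']) ((t.dropWhile (· != '_')).tail) := by
  induction p generalizing acc with
  | nil => simp [pvPhase1]
  | cons c rest ih =>
      have hc : c ≠ '_' := fun hc => h (hc ▸ List.mem_cons_self ..)
      simp only [List.cons_append, pvPhase1, if_neg hc]
      rw [ih (fun hm => h (List.mem_cons_of_mem _ hm))]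
      simp

lemma exists_decomp {l : List Char} (h : '_' ∈ l) :
    ∃ p t, l = p ++ '_' :: t ∧ '_' ∉ p := by
  induction l with
  | nil => cases h
  | cons c rest ih =>
      by_cases hc : c = '_'
      · exact ⟨[], rest, by simp [hc], by simp⟩
      · have hr : '_' ∈ rest := by
          rcases List.mem_cons.mp h with h | h
          · exact absurd h.symm hc
          · exact h
        rcases ih hr with ⟨p, t, hpt, hp⟩
        exact ⟨c :: p, t, by simp [hpt], by simp [hp, Ne.symm hc]⟩

lemma dropWhile_mid {m : List Char} (h : '_' ∉ m) (t : List Char) :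
    (m ++ '_' :: t).dropWhile (· != '_') = '_' :: t := by
  induction m with
  | nil => simp
  | cons c rest ih =>
      have hc : c ≠ '_' := fun hc => h (hc ▸ List.mem_cons_self ..)
      simp [hc, ih (fun hm => h (List.mem_cons_of_mem _ hm))]

lemma takeWhile_noU {s : List Char} (h : '_' ∉ s) : s.takeWhile (· != '_') = s := by
  induction s with
  | nil => simp
  | cons c rest ih =>
      have hc : c ≠ '_' := fun hc => h (hc ▸ List.mem_cons_self ..)
      simp [hc, ih (fun hm => h (List.mem_cons_of_mem _ hm))]

lemma takeWhile_mid {m : List Char} (h : '_' ∉ m) (t : List Char) :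
    (m ++ '_' :: t).takeWhile (· != '_') = m := by
  induction m with
  | nil => simp
  | cons c rest ih =>
      have hc : c ≠ '_' := fun hc => h (hc ▸ List.mem_cons_self ..)
      simp [hc, ih (fun hm => h (List.mem_cons_of_mem _ hm))]

-- ===== VERDICT (by name: the statement is the Claim_ definition above) =====
theorem format_name_output_img_spec : Claim_equal_format_name_output_img := by
  intro name cont _ hpre
  obtain ⟨-, hcount⟩ := hpre
  unfold Spec_format_name_output_img format_name_output_img format_name_output_img_alt
  set l := name.toList with hl
  rw [splitOn_eq_msp]
  by_cases hmem : '_' ∈ l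
  · -- at least two '_' in the name: l = p0 ++ '_' :: mid ++ '_' :: t2
    obtain ⟨p0, t1, hdec, hp0⟩ := exists_decomp hmem
    have ht1 : '_' ∈ t1 := by
      by_contra ht1
      apply hcount
      rw [hdec, List.count_append, List.count_cons]
      simp [List.count_eq_zero.mpr hp0, List.count_eq_zero.mpr ht1]
    obtain ⟨mid, t2, hdec2, hmid⟩ := exists_decomp ht1
    rw [hdec, hdec2]
    rw [phase1_split hp0, dropWhile_mid hmid, List.tail_cons, phase2_spec]
    rw [msp_split hp0, msp_split hmid]
    by_cases h2 : '_' ∈ t2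
    · obtain ⟨p2, t3, hdec3, hp2⟩ := exists_decomp h2
      subst hdec3
      rw [msp_split hp2, takeWhile_mid hp2]
      have hne := msp_ne_nil t3 []
      obtain ⟨q, qs, hq⟩ : ∃ q qs, msp [] t3 = q :: qs := by
        cases hmsp : msp [] t3 with
        | nil => exact absurd hmsp hne
        | cons q qs => exact ⟨q, qs, rfl⟩
      rw [hq]
      simp [PySem.List.pyGet?, PySem.List.pyIdx?,
        show (0:Int) ≤ (qs.length:Int) + 1 + 1 + 1 from by omega,
        show (2:Int) ≤ (qs.length:Int) + 1 + 1 + 1 from by omega]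
    · rw [msp_noU h2, takeWhile_noU h2]
      simp [PySem.List.pyGet?, PySem.List.pyIdx?, h2]
  · -- no '_' in the name: A copies it whole, B's split has a single part
    rw [phase1_noU hmem, msp_noU hmem]
    simp
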